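-- pv_equiv track=rewrite | github.com/VerbalAid/Medical_Justifications_Human_vs_LLM_-Corpus_Linguistics- | pipeline/corpus_context.py | _sentence_bounds
-- ===== SOURCE A (Python) =====
-- _SKIP_AFTER_SENTENCE = frozenset("\"')]}")
--
-- def _sentence_bounds(text: str, start: int, end: int) -> tuple[int, int]:
--     """Expand [start, end) to a rough sentence using . ! ? followed by space or EOL."""
--     lo, hi = 0, len(text)
--     i = start - 1
--     while i >= 0:
--         ch = text[i]
--         if ch in ".!?":
--             tail = i + 1
--             while tail < len(text) and text[tail] in _SKIP_AFTER_SENTENCE: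
--                 tail += 1
--             if tail >= len(text) or text[tail] in " \n\t\r":
--                 lo = i + 1
--                 while lo < len(text) and text[lo] in " \n\t\r":
--                     lo += 1
--                 break
--         i -= 1
--     j = end
--     while j < len(text):
--         if text[j] in ".!?":
--             tail = j + 1
--             while tail < len(text) and text[tail] in _SKIP_AFTER_SENTENCE:
--                 tail += 1
--             if tail >= len(text) or text[tail] in " \n\t\r":
--                 hi = tail
--                 break
--         j += 1
--     return lo, hi
-- ===== SOURCE B (Python) =====
-- _SKIP_AFTER_SENTENCE = frozenset("\"')]}")
--
-- def _sentence_bounds(text: str, start: int, end: int) -> tuple[int, int]: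
--     """Expand [start, end) to a rough sentence: single left-to-right pass
--     collecting every sentence boundary, then pick the neighbours of the range."""
--     n = len(text)
--     bounds = []  # (punct index, end-of-boundary index) for every qualifying . ! ?
--     for i, ch in enumerate(text):
--         if ch in ".!?":
--             tail = i + 1
--             while tail < n and text[tail] in _SKIP_AFTER_SENTENCE:
--                 tail += 1
--             if tail >= n or text[tail] in " \n\t\r":
--                 bounds.append((i, tail))
--     # lo: just after the rightmost boundary punct strictly before `start`
--     last = None
--     for i, _ in bounds:
--         if i < start:
--             last = i
--         else:
--             break
--     lo = 0
--     if last is not None: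
--         lo = last + 1
--         while lo < n and text[lo] in " \n\t\r":
--             lo += 1
--     # hi: end of the leftmost boundary at or after `end`
--     hi = next((tail for i, tail in bounds if i >= end), n)
--     return lo, hi
-- ===== Notes on version B (the rewrite author's own statement) =====
-- stated objective: alternative
-- what changed: B makes one left-to-right pass collecting every sentence boundary (punct index, tail index) into a list and then picks the rightmost boundary before start and the leftmost boundary at or after end, replacing A's two directional character scans outward from the range edges.
-- outside the precondition, e.g. on _sentence_bounds('a. b', 0, -3): A returns (0, -2), B returns (0, 2); on _sentence_bounds('ab', 5, 0): A raises IndexError, B returns (0, 2)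
import Mathlib
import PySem

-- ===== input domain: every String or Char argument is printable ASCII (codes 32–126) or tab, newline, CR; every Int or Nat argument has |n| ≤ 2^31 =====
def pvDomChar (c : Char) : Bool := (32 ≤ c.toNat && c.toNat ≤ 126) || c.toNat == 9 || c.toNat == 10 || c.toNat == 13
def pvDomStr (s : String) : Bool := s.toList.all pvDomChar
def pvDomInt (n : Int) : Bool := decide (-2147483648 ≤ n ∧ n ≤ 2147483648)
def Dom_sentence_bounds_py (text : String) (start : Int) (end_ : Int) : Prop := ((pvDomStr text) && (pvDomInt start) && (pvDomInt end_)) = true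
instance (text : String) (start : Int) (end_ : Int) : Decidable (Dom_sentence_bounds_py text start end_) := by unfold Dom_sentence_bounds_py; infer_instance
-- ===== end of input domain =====

-- B replaces A's two directional scans outward from the range edges by one left-to-right
-- pass that collects every sentence boundary, then a neighbour lookup (objective: alternative).
-- Shared character tests and the two small inner while-loops (skip-quotes tail, whitespace
-- skip) are textually identical in both Pythons and are ported once, as helpers.

def pvPunct (c : Char) : Bool := c = '.' || c = '!' || c = '?'
def pvSkipC (c : Char) : Bool := c = '"' || c = '\'' || c = ')' || c = ']' || c = '}'
def pvWsC (c : Char) : Bool := c = ' ' || c = '\n' || c = '\t' || c = '\r'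

-- inner loop `while tail < len(text) and text[tail] in _SKIP_AFTER_SENTENCE: tail += 1`
-- (fuel = cs.length - t bounds the loop; the guard t < cs.length keeps the semantics exact)
def pvTailGo (cs : List Char) : Nat → Nat → Nat
  | 0, t => t
  | fuel + 1, t =>
    if h : t < cs.length then
      if pvSkipC cs[t] then pvTailGo cs fuel (t + 1) else t
    else t

def pvTail (cs : List Char) (t : Nat) : Nat := pvTailGo cs (cs.length - t) t

-- the test `tail >= len(text) or text[tail] in " \n\t\r"`
def pvOkAt (cs : List Char) (t : Nat) : Bool :=
  if _h : t < cs.length then pvWsC cs[t] else true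

-- inner loop `while lo < len(text) and text[lo] in " \n\t\r": lo += 1`
def pvWsSkipGo (cs : List Char) : Nat → Nat → Nat
  | 0, l => l
  | fuel + 1, l =>
    if h : l < cs.length then
      if pvWsC cs[l] then pvWsSkipGo cs fuel (l + 1) else l
    else l

def pvWsSkip (cs : List Char) (l : Nat) : Nat := pvWsSkipGo cs (cs.length - l) l

-- ===== PORT A =====
-- backward while-loop of A: `i = start - 1; while i >= 0: ...`
def pvLoAGo (cs : List Char) : Nat → Int → Int
  | 0, _ => 0          -- fuel (i+1).toNat = 0 exactly when i < 0: the `while i >= 0` guard fails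
  | fuel + 1, i =>
    if _h0 : 0 ≤ i then
      match PySem.List.pyGet? cs i with
      | none => 0   -- Python raises IndexError here (start > len(text)); excluded by Pre_
      | some ch =>
        if pvPunct ch && pvOkAt cs (pvTail cs (i.toNat + 1)) then
          ((pvWsSkip cs (i.toNat + 1) : Nat) : Int)
        else pvLoAGo cs fuel (i - 1)
    else 0

def pvLoA (cs : List Char) (i : Int) : Int := pvLoAGo cs (i + 1).toNat i

-- forward while-loop of A: `j = end; while j < len(text): ...`
def pvHiAGo (cs : List Char) : Nat → Nat → Int
  | 0, _ => (cs.length : Int)   -- fuel cs.length - j = 0 exactly when j ≥ cs.length: `while j < len` fails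
  | fuel + 1, j =>
    if h : j < cs.length then
      if pvPunct cs[j] && pvOkAt cs (pvTail cs (j + 1)) then ((pvTail cs (j + 1) : Nat) : Int)
      else pvHiAGo cs fuel (j + 1)
    else (cs.length : Int)

def pvHiA (cs : List Char) (j : Nat) : Int := pvHiAGo cs (cs.length - j) j

def sentence_bounds_py (text : String) (start : Int) (end_ : Int) : Int × Int :=
  let cs := text.toList
  -- end_ < 0 is excluded by Pre_ (Python's negative-index wraparound / IndexError); .toNat clamps there
  (pvLoA cs (start - 1), pvHiA cs end_.toNat)

-- ===== PORT B =====
-- `for i, ch in enumerate(text): ... bounds.append((i, tail))`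
def pvBoundsB (cs : List Char) : List (Int × Nat) :=
  (PySem.List.enumerate cs 0).filterMap (fun p =>
    if pvPunct p.2 then
      let t := pvTail cs (p.1.toNat + 1)
      if pvOkAt cs t then some (p.1, t) else none
    else none)

-- `for i, _ in bounds: if i < start: last = i else: break`
def pvLastB (s : Int) : List (Int × Nat) → Option Int → Option Int
  | [], acc => acc
  | (i, _) :: rest, acc => if i < s then pvLastB s rest (some i) else acc

-- `next((tail for i, tail in bounds if i >= end), n)`
def pvFirstB (e : Int) : List (Int × Nat) → Option Nat
  | [] => none
  | (i, t) :: rest => if e ≤ i then some t else pvFirstB e rest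

def sentence_bounds_py_alt (text : String) (start : Int) (end_ : Int) : Int × Int :=
  let cs := text.toList
  let bounds := pvBoundsB cs
  let lo : Int :=
    match pvLastB start bounds none with
    | none => 0
    | some i => ((pvWsSkip cs (i + 1).toNat : Nat) : Int)
  let hi : Int :=
    match pvFirstB end_ bounds with
    | none => (cs.length : Int)
    | some t => (t : Int)
  (lo, hi)

-- ===== PRECONDITION & SPEC =====
-- Pre_ excludes start > len(text), where A raises IndexError, and end_ < 0, which is outside the
-- natural index domain: there A either raises or returns a value produced by Python's
-- negative-index wraparound (it can even return a negative hi); see claim.json "cites".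
def Pre_sentence_bounds_py (text : String) (start : Int) (end_ : Int) : Prop :=
  start ≤ (text.toList.length : Int) ∧ 0 ≤ end_
instance (text : String) (start : Int) (end_ : Int) : Decidable (Pre_sentence_bounds_py text start end_) := by unfold Pre_sentence_bounds_py; infer_instance

def pvWitness_sentence_bounds_py : String × Int × Int := ("He won. Big win! ok", 10, 12)

def Spec_sentence_bounds_py (text : String) (start : Int) (end_ : Int) (out : Int × Int) : Prop := out = sentence_bounds_py_alt text start end_
instance (text : String) (start : Int) (end_ : Int) (out : Int × Int) : Decidable (Spec_sentence_bounds_py text start end_ out) := by unfold Spec_sentence_bounds_py; infer_instance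

-- ===== CLAIM (what is proved, stated in full; the proofs are below) =====
def Claim_equal_sentence_bounds_py : Prop := ∀ (text : String) (start : Int) (end_ : Int), Dom_sentence_bounds_py text start end_ → Pre_sentence_bounds_py text start end_ → Spec_sentence_bounds_py text start end_ (sentence_bounds_py text start end_)

-- ===== LEMMAS AND PROOFS =====

-- qualifying boundary test at index k (k < cs.length assumed via getElem?)
def pvQ (cs : List Char) (k : Nat) : Bool :=
  match cs[k]? with
  | some c => pvPunct c && pvOkAt cs (pvTail cs (k + 1))
  | none => false

-- proof-side generator: the boundary list restricted to indices ≥ k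
def pvGen (cs : List Char) (k : Nat) : List (Int × Nat) :=
  if h : k < cs.length then
    if pvQ cs k then ((k : Int), pvTail cs (k + 1)) :: pvGen cs (k + 1) else pvGen cs (k + 1)
  else []
termination_by cs.length - k

-- last qualifying index in [k, cs.length) that is < s
def pvLastQ (cs : List Char) (s : Int) (k : Nat) : Option Nat :=
  if _h : k < cs.length then
    let rest := pvLastQ cs s (k + 1)
    if pvQ cs k && decide ((k : Int) < s) then
      (match rest with | some j => some j | none => some k)
    else rest
  else none
termination_by cs.length - k

theorem pvHiA_unfold (cs : List Char) (j : Nat) :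
    pvHiA cs j =
      (if h : j < cs.length then
        if pvPunct cs[j] && pvOkAt cs (pvTail cs (j + 1)) then ((pvTail cs (j + 1) : Nat) : Int)
        else pvHiA cs (j + 1)
      else (cs.length : Int)) := by
  unfold pvHiA
  by_cases h : j < cs.length
  · have hf : cs.length - j = (cs.length - (j + 1)) + 1 := by omega
    rw [hf]
    simp [pvHiAGo, h]
  · have hf : cs.length - j = 0 := by omega
    rw [hf]
    simp [pvHiAGo, h]

theorem pvLoA_unfold (cs : List Char) (i : Int) :
    pvLoA cs i =
      (if _h0 : 0 ≤ i then
        match PySem.List.pyGet? cs i with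
        | none => 0
        | some ch =>
          if pvPunct ch && pvOkAt cs (pvTail cs (i.toNat + 1)) then
            ((pvWsSkip cs (i.toNat + 1) : Nat) : Int)
          else pvLoA cs (i - 1)
      else 0) := by
  unfold pvLoA
  by_cases h : 0 ≤ i
  · have hf : (i + 1).toNat = ((i - 1) + 1).toNat + 1 := by omega
    rw [hf]
    simp [pvLoAGo, h]
  · have hf : (i + 1).toNat = 0 := by omega
    rw [hf]
    simp [pvLoAGo, h]

theorem pvQ_pos (cs : List Char) (k : Nat) (h : k < cs.length) :
    pvQ cs k = (pvPunct cs[k] && pvOkAt cs (pvTail cs (k + 1))) := by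
  unfold pvQ; rw [List.getElem?_eq_getElem h]

theorem pvGen_cons (cs : List Char) (k : Nat) (h : k < cs.length) :
    pvGen cs k = (if pvQ cs k then ((k : Int), pvTail cs (k + 1)) :: pvGen cs (k + 1) else pvGen cs (k + 1)) := by
  rw [pvGen]; simp [h]

theorem pvGen_nil (cs : List Char) (k : Nat) (h : ¬ k < cs.length) :
    pvGen cs k = [] := by
  rw [pvGen]; simp [h]

theorem pvEnum_gen (cs : List Char) (k : Nat) :
    (PySem.List.enumerate (cs.drop k) (k : Int)).filterMap (fun p =>
      if pvPunct p.2 then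
        let t := pvTail cs (p.1.toNat + 1)
        if pvOkAt cs t then some (p.1, t) else none
      else none) = pvGen cs k := by
  by_cases h : k < cs.length
  · have hdrop : cs.drop k = cs[k] :: cs.drop (k + 1) := List.drop_eq_getElem_cons h
    have hc : ((k : Int) + 1) = ((k + 1 : Nat) : Int) := by push_cast; ring
    rw [hdrop, PySem.List.enumerate_cons, List.filterMap_cons, hc,
      pvEnum_gen cs (k + 1), pvGen_cons cs k h, pvQ_pos cs k h]
    by_cases hp : pvPunct cs[k]
    · by_cases ho : pvOkAt cs (pvTail cs (k + 1))
      · simp [hp, ho]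
      · simp [hp, ho]
    · simp [hp]
  · have hd : cs.drop k = [] := List.drop_eq_nil_of_le (by omega)
    rw [hd, pvGen_nil cs k h]
    simp [PySem.List.enumerate]
termination_by cs.length - k

theorem pvBounds_eq_gen (cs : List Char) : pvBoundsB cs = pvGen cs 0 := by
  have h := pvEnum_gen cs 0
  unfold pvBoundsB
  simpa using h

theorem pvFirstB_gen (cs : List Char) (e : Int) (k : Nat) (hk : e ≤ (k : Int)) :
    (match pvFirstB e (pvGen cs k) with
     | none => (cs.length : Int)
     | some t => (t : Int)) = pvHiA cs k := by
  by_cases h : k < cs.length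
  · by_cases hq : pvQ cs k
    · rw [pvGen_cons cs k h, if_pos hq, pvFirstB, if_pos hk, pvHiA_unfold]
      simp [h, ← pvQ_pos cs k h, hq]
    · rw [pvGen_cons cs k h, if_neg hq,
        pvFirstB_gen cs e (k + 1) (by push_cast; omega)]
      conv_rhs => rw [pvHiA_unfold]
      simp [h, ← pvQ_pos cs k h, hq]
  · rw [pvGen_nil cs k h, pvHiA_unfold]
    simp [h, pvFirstB]
termination_by cs.length - k

theorem pvFirstB_gen_skip (cs : List Char) (e : Int) (k : Nat) (hk : (k : Int) < e) :
    pvFirstB e (pvGen cs k) = pvFirstB e (pvGen cs (k + 1)) := by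
  by_cases h : k < cs.length
  · by_cases hq : pvQ cs k
    · rw [pvGen_cons cs k h, if_pos hq, pvFirstB]
      have : ¬ (e ≤ (k : Int)) := by omega
      simp [this]
    · rw [pvGen_cons cs k h, if_neg hq]
  · rw [pvGen_nil cs k h, pvGen_nil cs (k + 1) (by omega)]

theorem pvLastQ_cons (cs : List Char) (s : Int) (k : Nat) (h : k < cs.length) :
    pvLastQ cs s k =
      (if pvQ cs k && decide ((k : Int) < s) then
        (match pvLastQ cs s (k + 1) with | some j => some j | none => some k)
      else pvLastQ cs s (k + 1)) := by
  rw [pvLastQ]; simp [h]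

theorem pvLastQ_none (cs : List Char) (s : Int) (k : Nat) (hk : s ≤ (k : Int)) :
    pvLastQ cs s k = none := by
  rw [pvLastQ]
  split
  · have hrest : pvLastQ cs s (k + 1) = none := pvLastQ_none cs s (k + 1) (by push_cast; omega)
    have hns : ¬ ((k : Int) < s) := by omega
    simp [hrest, hns]
  · rfl
termination_by cs.length - k

theorem pvLastB_gen (cs : List Char) (s : Int) (k : Nat) (acc : Option Int) :
    pvLastB s (pvGen cs k) acc = ((pvLastQ cs s k).map (fun j => (j : Int))).or acc := by
  by_cases h : k < cs.length
  · by_cases hq : pvQ cs k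
    · by_cases hks : (k : Int) < s
      · rw [pvGen_cons cs k h, if_pos hq, pvLastB, if_pos hks,
          pvLastB_gen cs s (k + 1) (some (k : Int)), pvLastQ_cons cs s k h]
        cases hrest : pvLastQ cs s (k + 1) with
        | none => simp [hq, hks]
        | some j => simp [hq, hks]
      · have hrest : pvLastQ cs s (k + 1) = none :=
          pvLastQ_none cs s (k + 1) (by push_cast; omega)
        rw [pvGen_cons cs k h, if_pos hq, pvLastB, if_neg hks, pvLastQ_cons cs s k h]
        simp [hq, hks, hrest]
    · rw [pvGen_cons cs k h, if_neg hq, pvLastB_gen cs s (k + 1) acc, pvLastQ_cons cs s k h]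
      simp [hq]
  · rw [pvGen_nil cs k h, pvLastQ]
    simp [h, pvLastB]
termination_by cs.length - k

theorem pvLastQ_peel (cs : List Char) (s : Int) (k : Nat) (hks : (k : Int) < s)
    (hs : s ≤ (cs.length : Int)) :
    pvLastQ cs s k =
      if pvQ cs (s - 1).toNat then some (s - 1).toNat else pvLastQ cs (s - 1) k := by
  have hklen : k < cs.length := by omega
  by_cases heq : (k : Int) = s - 1
  · have hkN : (s - 1).toNat = k := by omega
    have hrest : pvLastQ cs s (k + 1) = none := pvLastQ_none cs s (k + 1) (by push_cast; omega)
    have hrest2 : pvLastQ cs (s - 1) k = none := pvLastQ_none cs (s - 1) k (by omega)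
    rw [hkN, pvLastQ_cons cs s k hklen]
    by_cases hq : pvQ cs k
    · simp [hrest, hks, hq]
    · simp [hrest, hrest2, hks, hq]
  · have hlt : (k : Int) < s - 1 := by omega
    have IH := pvLastQ_peel cs s (k + 1) (by push_cast; omega) hs
    by_cases hq1 : pvQ cs (s - 1).toNat
    · rw [if_pos hq1, pvLastQ_cons cs s k hklen, IH, if_pos hq1]
      by_cases hq : pvQ cs k
      · simp [hq, hks]
      · simp [hq]
    · rw [if_neg hq1, pvLastQ_cons cs s k hklen, IH, if_neg hq1,
        pvLastQ_cons cs (s - 1) k hklen]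
      by_cases hq : pvQ cs k
      · simp [hq, hks, hlt]
      · simp [hq]
termination_by cs.length - k

theorem pvLoA_eq (cs : List Char) (s : Int) (hs : s ≤ (cs.length : Int)) :
    pvLoA cs (s - 1) =
      match pvLastQ cs s 0 with
      | none => 0
      | some j => ((pvWsSkip cs (j + 1) : Nat) : Int) := by
  by_cases h0 : 0 < s
  · have hge : 0 ≤ s - 1 := by omega
    have hidx : (s - 1).toNat < cs.length := by omega
    have hget : PySem.List.pyGet? cs (s - 1) = some cs[(s - 1).toNat] :=
      PySem.List.pyGet?_eq_some_getElem cs (by omega) (by omega)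
    have hpeel := pvLastQ_peel cs s 0 (by omega) hs
    rw [pvLoA_unfold, dif_pos hge, hget]
    by_cases hq : pvQ cs (s - 1).toNat
    · have hcond : (pvPunct cs[(s - 1).toNat] && pvOkAt cs (pvTail cs ((s - 1).toNat + 1))) = true := by
        rw [← pvQ_pos cs _ hidx]; exact hq
      rw [hpeel, if_pos hq]
      simp only [hcond, if_true]
    · have hcond : (pvPunct cs[(s - 1).toNat] && pvOkAt cs (pvTail cs ((s - 1).toNat + 1))) = false := by
        rw [← pvQ_pos cs _ hidx]; simpa using hq
      rw [hpeel, if_neg hq]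
      have IH := pvLoA_eq cs (s - 1) (by omega)
      simp only [hcond, Bool.false_eq_true, if_false]
      exact IH
  · have h1 : ¬ (0 ≤ s - 1) := by omega
    rw [pvLoA_unfold, dif_neg h1, pvLastQ_none cs s 0 (by omega)]
termination_by s.toNat
decreasing_by omega

theorem pvFirstB_gen_zero (cs : List Char) (e : Int) (h0 : 0 ≤ e) :
    pvFirstB e (pvGen cs 0) = pvFirstB e (pvGen cs e.toNat) := by
  have key : ∀ n m, m + n = e.toNat → pvFirstB e (pvGen cs m) = pvFirstB e (pvGen cs e.toNat) := by
    intro n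
    induction n with
    | zero =>
      intro m hm
      have hm' : m = e.toNat := by omega
      subst hm'
      rfl
    | succ n ih =>
      intro m hm
      rw [pvFirstB_gen_skip cs e m (by omega)]
      exact ih (m + 1) (by omega)
  exact key e.toNat 0 (by omega)

-- ===== VERDICT (by name: the statement is the Claim_ definition above) =====
theorem sentence_bounds_py_spec : Claim_equal_sentence_bounds_py := by
  intro text start end_ _ hpre
  rcases hpre with ⟨hstart, hend⟩
  unfold Spec_sentence_bounds_py sentence_bounds_py sentence_bounds_py_alt
  simp only [Prod.mk.injEq]
  constructor
  · rw [pvBounds_eq_gen, pvLastB_gen text.toList start 0 none,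
      pvLoA_eq text.toList start hstart]
    cases hl : pvLastQ text.toList start 0 with
    | none => simp
    | some j =>
      have : ((j : Int) + 1).toNat = j + 1 := by omega
      simp [this]
  · rw [pvBounds_eq_gen, pvFirstB_gen_zero text.toList end_ hend,
      pvFirstB_gen text.toList end_ end_.toNat (by omega)]
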